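-- pv_equiv track=rewrite | github.com/Adotac/Pagasa-WebScraper | typhoon_extraction_ml.py | _build_island_group_dict_from_warnings
-- ===== SOURCE A (Python) =====
-- from typing import Dict, List, Tuple, Optional
--
-- def _build_island_group_dict_from_warnings(warnings_by_level: Dict[int, Dict[str, Optional[str]]], level: int) -> Dict:
--     """
--     Build IslandGroupType dictionary for specific warning level.
--     warnings_by_level format: {level: {island_group: location_string}}
--     """
--     result = {
--         'Luzon': None,
--         'Visayas': None,
--         'Mindanao': None,
--         'Other': None
--     }
--
--     # Get locations for this warning level
--     if level in warnings_by_level: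
--         level_data = warnings_by_level[level]
--         for island_group, location_string in level_data.items():
--             if island_group in result:
--                 result[island_group] = location_string
--
--     return result
-- ===== SOURCE B (Python) =====
-- def _build_island_group_dict_from_warnings(warnings_by_level, level):
--     level_data = warnings_by_level.get(level, {})
--     return {name: level_data.get(name)
--             for name in ('Luzon', 'Visayas', 'Mindanao', 'Other')}
-- ===== Notes on version B (the rewrite author's own statement) =====
-- stated objective: idiomatic
-- what changed: Instead of initialising a four-key dict and scanning the level's dict filtering by membership to overwrite entries, B iterates over the four fixed group names and looks each one up with .get in a single comprehension.
import Mathlib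
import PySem

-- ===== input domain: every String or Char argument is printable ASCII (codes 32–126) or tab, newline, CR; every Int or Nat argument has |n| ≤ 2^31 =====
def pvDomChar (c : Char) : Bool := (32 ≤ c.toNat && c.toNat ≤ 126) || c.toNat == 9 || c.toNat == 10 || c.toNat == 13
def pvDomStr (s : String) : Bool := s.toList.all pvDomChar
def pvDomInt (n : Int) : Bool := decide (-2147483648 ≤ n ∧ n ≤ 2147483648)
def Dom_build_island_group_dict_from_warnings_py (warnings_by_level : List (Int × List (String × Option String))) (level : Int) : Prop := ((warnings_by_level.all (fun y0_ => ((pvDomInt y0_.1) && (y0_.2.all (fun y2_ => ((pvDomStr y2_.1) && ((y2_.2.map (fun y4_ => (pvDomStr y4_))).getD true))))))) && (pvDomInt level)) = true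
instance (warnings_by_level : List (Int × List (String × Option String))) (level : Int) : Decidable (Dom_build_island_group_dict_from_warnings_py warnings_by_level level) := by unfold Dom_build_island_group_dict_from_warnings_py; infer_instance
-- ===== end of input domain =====

-- B replaces A's membership-filtered scan of the level's dict with direct lookups of the
-- four fixed group names (idiomatic inversion of the traversal); same values everywhere on Pre_.

-- ===== PORT A =====
-- helper: one iteration of A's 'for island_group, location_string in level_data.items()' loop body
def pvStep (res : PySem.Dict String (Option String)) (kv : String × Option String) :
    PySem.Dict String (Option String) :=
  if res.contains kv.1 then res.insert kv.1 kv.2 else res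

def build_island_group_dict_from_warnings_py (warnings_by_level : List (Int × List (String × Option String))) (level : Int) : List (String × Option String) :=
  let result : PySem.Dict String (Option String) :=
    PySem.Dict.mk [("Luzon", none), ("Visayas", none), ("Mindanao", none), ("Other", none)]
  let result :=
    if (PySem.Dict.mk warnings_by_level).contains level then
      let level_data := (PySem.Dict.mk warnings_by_level).getD level []
      level_data.foldl pvStep result
    else result
  result.items

-- ===== PORT B =====
def build_island_group_dict_from_warnings_py_alt (warnings_by_level : List (Int × List (String × Option String))) (level : Int) : List (String × Option String) :=
  let level_data := (PySem.Dict.mk warnings_by_level).getD level []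
  ["Luzon", "Visayas", "Mindanao", "Other"].map
    (fun name => (name, (PySem.Dict.mk level_data).getD name none))

-- ===== PRECONDITION & SPEC =====
-- Pre_ excludes association lists whose inner key lists contain duplicates: such lists do not
-- represent any Python dict (on a genuine dict input both programs agree; in the assoc-list model
-- A's overwrite loop keeps the last duplicate while B's first-match lookup keeps the first).
def Pre_build_island_group_dict_from_warnings_py (warnings_by_level : List (Int × List (String × Option String))) (level : Int) : Prop :=
  ∀ p ∈ warnings_by_level, (p.2.map Prod.fst).Nodup
instance (warnings_by_level : List (Int × List (String × Option String))) (level : Int) : Decidable (Pre_build_island_group_dict_from_warnings_py warnings_by_level level) := by unfold Pre_build_island_group_dict_from_warnings_py; infer_instance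

def pvWitness_build_island_group_dict_from_warnings_py : (List (Int × List (String × Option String))) × Int :=
  ([(1, [("Luzon", some "Batanes"), ("Visayas", none)])], 1)

def Spec_build_island_group_dict_from_warnings_py (warnings_by_level : List (Int × List (String × Option String))) (level : Int) (out : List (String × Option String)) : Prop := out = build_island_group_dict_from_warnings_py_alt warnings_by_level level
instance (warnings_by_level : List (Int × List (String × Option String))) (level : Int) (out : List (String × Option String)) : Decidable (Spec_build_island_group_dict_from_warnings_py warnings_by_level level out) := by unfold Spec_build_island_group_dict_from_warnings_py; infer_instance

-- ===== CLAIM (what is proved, stated in full; the proofs are below) =====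
def Claim_equal_build_island_group_dict_from_warnings_py : Prop := ∀ (warnings_by_level : List (Int × List (String × Option String))) (level : Int), Dom_build_island_group_dict_from_warnings_py warnings_by_level level → Pre_build_island_group_dict_from_warnings_py warnings_by_level level → Spec_build_island_group_dict_from_warnings_py warnings_by_level level (build_island_group_dict_from_warnings_py warnings_by_level level)

-- ===== LEMMAS AND PROOFS =====

-- get? on a map-shaped association dict
lemma pv_get?_mapform (names : List String) (g : String → Option String) (k : String) :
    (PySem.Dict.mk (names.map fun n => (n, g n))).get? k
      = if k ∈ names then some (g k) else none := by
  induction names with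
  | nil => simp [PySem.Dict.get?]
  | cons m rest ih =>
    simp only [List.map_cons, PySem.Dict.get?_mk_cons, ih, List.mem_cons]
    by_cases h : m = k
    · subst h; simp
    · simp [h, beq_iff_eq, Ne.symm h]

-- insert into a map-shaped dict at a present key rewrites the map pointwise
lemma pv_insert_mapform (names : List String) (g : String → Option String) (k : String)
    (v : Option String) (hk : k ∈ names) :
    (PySem.Dict.mk (names.map fun n => (n, g n))).insert k v
      = PySem.Dict.mk (names.map fun n => (n, if n = k then v else g n)) := by
  apply PySem.Dict.ext
  have hc : (PySem.Dict.mk (names.map fun n => (n, g n))).contains k = true := by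
    rw [PySem.Dict.contains_eq_isSome_get?, pv_get?_mapform]
    simp [hk]
  rw [PySem.Dict.items_insert_of_contains (h := hc)]
  show (names.map fun n => (n, g n)).map _ = _
  rw [List.map_map]
  refine List.map_congr_left (fun n _ => ?_)
  by_cases h : n = k
  · subst h; simp
  · simp [h, beq_iff_eq]

lemma pv_contains_mapform (names : List String) (g : String → Option String) (k : String) :
    (PySem.Dict.mk (names.map fun n => (n, g n))).contains k = decide (k ∈ names) := by
  rw [PySem.Dict.contains_eq_isSome_get?, pv_get?_mapform]
  by_cases h : k ∈ names <;> simp [h]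

-- the main loop invariant: A's fold over a duplicate-free item list computes pointwise lookups
lemma pv_foldl_mapform (names : List String) :
    ∀ (ld : List (String × Option String)) (g : String → Option String),
    (ld.map Prod.fst).Nodup →
    ld.foldl pvStep (PySem.Dict.mk (names.map fun n => (n, g n)))
      = PySem.Dict.mk (names.map fun n => (n, ((PySem.Dict.mk ld).get? n).getD (g n))) := by
  intro ld
  induction ld with
  | nil =>
    intro g _
    simp [PySem.Dict.get?]
  | cons kv rest ih =>
    intro g hnd
    obtain ⟨k, v⟩ := kv
    simp only [List.map_cons, List.nodup_cons] at hnd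
    obtain ⟨hknotin, hrest⟩ := hnd
    have hget : ∀ n, (PySem.Dict.mk ((k, v) :: rest)).get? n
        = if k = n then some v else (PySem.Dict.mk rest).get? n := by
      intro n; rw [PySem.Dict.get?_mk_cons]; by_cases h : k = n <;> simp [h]
    have hrestk : (PySem.Dict.mk rest).get? k = none := by
      rw [PySem.Dict.get?_eq_none_iff_not_mem_keys]
      simpa [PySem.Dict.keys] using hknotin
    rw [List.foldl_cons]
    by_cases hk : k ∈ names
    · rw [show pvStep (PySem.Dict.mk (names.map fun n => (n, g n))) (k, v)
          = PySem.Dict.mk (names.map fun n => (n, if n = k then v else g n)) from by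
        unfold pvStep
        rw [pv_contains_mapform]
        simp only [hk, decide_true, if_true]
        exact pv_insert_mapform names g k v hk]
      rw [ih _ hrest]
      congr 1
      refine List.map_congr_left (fun n _ => ?_)
      by_cases h : n = k
      · subst h; rw [hget, hrestk]; simp
      · rw [hget]; simp [Ne.symm h, h]
    · rw [show pvStep (PySem.Dict.mk (names.map fun n => (n, g n))) (k, v)
          = PySem.Dict.mk (names.map fun n => (n, g n)) from by
        unfold pvStep
        rw [pv_contains_mapform]
        simp [hk]]
      rw [ih _ hrest]
      congr 1
      refine List.map_congr_left (fun n hn => ?_)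
      have h : n ≠ k := fun e => hk (e ▸ hn)
      rw [hget]; simp [Ne.symm h]

-- ===== VERDICT (by name: the statement is the Claim_ definition above) =====
theorem build_island_group_dict_from_warnings_py_spec : Claim_equal_build_island_group_dict_from_warnings_py := by
  intro w level _ hpre
  unfold Spec_build_island_group_dict_from_warnings_py
  unfold build_island_group_dict_from_warnings_py build_island_group_dict_from_warnings_py_alt
  simp only []
  by_cases hc : (PySem.Dict.mk w).contains level = true
  · simp only [hc, if_true]
    set ld := (PySem.Dict.mk w).getD level [] with hld
    have hmem : ld = [] ∨ (level, ld) ∈ w := by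
      rcases h : (PySem.Dict.mk w).get? level with _ | val
      · left; rw [hld, PySem.Dict.getD_eq_get?_getD, h]; rfl
      · right
        have : ld = val := by rw [hld, PySem.Dict.getD_eq_get?_getD, h]; rfl
        rw [this]
        exact PySem.Dict.mem_items_of_get?_eq_some (h := h)
    have hnd : (ld.map Prod.fst).Nodup := by
      rcases hmem with h | h
      · simp [h]
      · exact hpre (level, ld) h
    have := pv_foldl_mapform ["Luzon", "Visayas", "Mindanao", "Other"] ld
      (fun _ => none) hnd
    rw [show (PySem.Dict.mk [("Luzon", (none : Option String)), ("Visayas", none), ("Mindanao", none), ("Other", none)])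
        = PySem.Dict.mk ((["Luzon", "Visayas", "Mindanao", "Other"].map fun n => (n, (fun _ => (none : Option String)) n))) from rfl]
    rw [this]
    simp [PySem.Dict.getD_eq_get?_getD]
  · simp only [hc]
    
    have hc' : (PySem.Dict.mk w).contains level = false := by
      cases h : (PySem.Dict.mk w).contains level
      · rfl
      · exact absurd h hc
    have : (PySem.Dict.mk w).getD level [] = [] :=
      PySem.Dict.getD_of_not_contains _ _ hc'
    rw [this]
    decide
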